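-- pv_equiv track=rewrite | github.com/MushroomRL/mushroom-rl | mushroom_rl/utils/dataset.py | compute_episodes_length
-- ===== SOURCE A (Python) =====
-- def compute_episodes_length(dataset):
--     """
--     Compute the length of each episode in the dataset.
--
--     Args:
--         dataset (list): the dataset to consider.
--
--     Returns:
--         A list of length of each episode in the dataset.
--
--     """
--     lengths = list()
--     l = 0
--     for sample in dataset:
--         l += 1
--         if sample[-1] == 1:
--             lengths.append(l)
--             l = 0
--
--     return lengths
-- ===== SOURCE B (Python) =====
-- def compute_episodes_length(dataset):
--     ends = [i for i, s in enumerate(dataset) if s[-1] == 1]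
--     if not ends:
--         return []
--     return [ends[0] + 1] + [b - a for a, b in zip(ends, ends[1:])]
-- ===== Notes on version B (the rewrite author's own statement) =====
-- stated objective: alternative
-- what changed: Replaces the single running-counter loop with two passes: collect the indices of terminal samples, then take first-index+1 and successive differences.
import Mathlib
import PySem

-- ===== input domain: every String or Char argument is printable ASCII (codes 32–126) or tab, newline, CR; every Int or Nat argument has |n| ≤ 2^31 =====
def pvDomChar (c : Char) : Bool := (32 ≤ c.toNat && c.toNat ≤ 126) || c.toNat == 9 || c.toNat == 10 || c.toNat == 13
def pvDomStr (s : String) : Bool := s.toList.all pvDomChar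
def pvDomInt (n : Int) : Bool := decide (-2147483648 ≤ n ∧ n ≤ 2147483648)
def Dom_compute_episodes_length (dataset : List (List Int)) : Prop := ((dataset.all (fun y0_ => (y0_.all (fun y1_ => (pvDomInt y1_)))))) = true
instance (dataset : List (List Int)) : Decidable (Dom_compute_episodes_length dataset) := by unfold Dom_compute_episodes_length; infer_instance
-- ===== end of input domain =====

-- B collects terminal indices and diffs them instead of keeping a running counter; same O(n) cost.

-- ===== PORT A =====
-- single fold carrying (lengths so far, current episode length l); sample[-1] via pyGet? (Pre_ rules out empty samples, where Python raises IndexError)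
def compute_episodes_length (dataset : List (List Int)) : List Int :=
  (dataset.foldl
    (fun (st : List Int × Int) sample =>
      let l := st.2 + 1
      if PySem.List.pyGet? sample (-1) = some 1 then (st.1 ++ [l], (0 : Int)) else (st.1, l))
    ([], 0)).1

-- ===== PORT B =====
-- pass 1: indices of terminal samples; pass 2: first index + 1, then successive differences (zip with tail)
def compute_episodes_length_alt (dataset : List (List Int)) : List Int :=
  let ends : List Int :=
    ((PySem.List.enumerate dataset 0).filter
      (fun p => PySem.List.pyGet? p.2 (-1) = some 1)).map (fun p => p.1)
  match ends with
  | [] => []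
  | e0 :: rest => (e0 + 1) :: (ends.zip rest).map (fun p => p.2 - p.1)

-- ===== PRECONDITION & SPEC =====
-- Pre_ excludes datasets containing an empty sample: there Python A (and B) raise IndexError on sample[-1].
def Pre_compute_episodes_length (dataset : List (List Int)) : Prop :=
  ∀ s ∈ dataset, s ≠ []
instance (dataset : List (List Int)) : Decidable (Pre_compute_episodes_length dataset) := by
  unfold Pre_compute_episodes_length; infer_instance

def pvWitness_compute_episodes_length : List (List Int) := [[0, 0], [5, 1], [1]]

def Spec_compute_episodes_length (dataset : List (List Int)) (out : List Int) : Prop := out = compute_episodes_length_alt dataset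
instance (dataset : List (List Int)) (out : List Int) : Decidable (Spec_compute_episodes_length dataset out) := by unfold Spec_compute_episodes_length; infer_instance

-- ===== CLAIM (what is proved, stated in full; the proofs are below) =====
def Claim_equal_compute_episodes_length : Prop := ∀ (dataset : List (List Int)), Dom_compute_episodes_length dataset → Pre_compute_episodes_length dataset → Spec_compute_episodes_length dataset (compute_episodes_length dataset)

-- ===== LEMMAS AND PROOFS =====

-- common recursive specification: episode lengths with l samples already accumulated
def epiSpec (l : Int) : List (List Int) → List Int
  | [] => []
  | s :: t =>
    if PySem.List.pyGet? s (-1) = some 1 then (l + 1) :: epiSpec 0 t else epiSpec (l + 1) t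

-- A's fold equals epiSpec
theorem foldA_eq_epiSpec (ds : List (List Int)) :
    ∀ (acc : List Int) (l : Int),
      (ds.foldl
        (fun (st : List Int × Int) sample =>
          let l := st.2 + 1
          if PySem.List.pyGet? sample (-1) = some 1 then (st.1 ++ [l], (0 : Int)) else (st.1, l))
        (acc, l)).1 = acc ++ epiSpec l ds := by
  induction ds with
  | nil => intro acc l; simp [epiSpec]
  | cons s t ih =>
    intro acc l
    simp only [List.foldl_cons, epiSpec]
    by_cases h : PySem.List.pyGet? s (-1) = some 1
    · simp [h, ih]
    · simp [h, ih]

-- successive differences starting from prev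
def diffs (prev : Int) : List Int → List Int
  | [] => []
  | e :: rest => (e - prev) :: diffs e rest

theorem zip_tail_eq_diffs (rest : List Int) :
    ∀ (e : Int), (((e :: rest).zip rest).map (fun p => p.2 - p.1)) = diffs e rest := by
  induction rest with
  | nil => intro e; simp [diffs]
  | cons e1 r ih => intro e; simp [diffs, ih]

theorem ends_diffs_eq_epiSpec (ds : List (List Int)) :
    ∀ (i prev l : Int), prev = i - l - 1 →
      diffs prev
        (((PySem.List.enumerate ds i).filter
          (fun p => PySem.List.pyGet? p.2 (-1) = some 1)).map (fun p => p.1))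
        = epiSpec l ds := by
  induction ds with
  | nil => intro i prev l _; simp [PySem.List.enumerate_nil, epiSpec, diffs]
  | cons s t ih =>
    intro i prev l hp
    rw [PySem.List.enumerate_cons]
    by_cases h : PySem.List.pyGet? s (-1) = some 1
    · rw [List.filter_cons_of_pos (by simp [h])]
      simp only [List.map_cons, diffs, epiSpec, if_pos h]
      rw [ih (i + 1) i 0 (by omega)]
      congr 1
      omega
    · rw [List.filter_cons_of_neg (by simp [h])]
      simp only [epiSpec, if_neg h]
      exact ih (i + 1) prev (l + 1) (by omega)

-- ===== VERDICT (by name: the statement is the Claim_ definition above) =====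
theorem compute_episodes_length_spec : Claim_equal_compute_episodes_length := by
  intro dataset _ _
  unfold Spec_compute_episodes_length compute_episodes_length compute_episodes_length_alt
  rw [foldA_eq_epiSpec dataset [] 0, List.nil_append]
  rw [← ends_diffs_eq_epiSpec dataset 0 (-1) 0 (by omega)]
  cases hE : ((PySem.List.enumerate dataset 0).filter
      (fun p => PySem.List.pyGet? p.2 (-1) = some 1)).map (fun p => p.1) with
  | nil => simp [diffs]
  | cons e0 rest =>
    simp only [diffs, sub_neg_eq_add]
    rw [zip_tail_eq_diffs rest e0]
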